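-- pv_equiv track=rewrite | github.com/dkeate-dev/project-euler-solutions | p0035.py | check_circular
-- ===== SOURCE A (Python) =====
-- def check_circular(num, primes):
--     next_num = num
--
--     while next_num in primes:
--         num_str = [a for a in str(next_num)]
--         temp_char = num_str.pop(-1)
--         num_str.insert(0, temp_char)
--         new = ""
--         for l in num_str:
--             new += l
--         next_num = int(new)
--         if next_num == num:
--             return True
--
--     return False
-- ===== SOURCE B (Python) =====
-- def check_circular(num, primes):
--     s = str(num)
--     return all(int(s[i:] + s[:i]) in primes for i in range(len(s)))
-- ===== Notes on version B (the rewrite author's own statement) =====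
-- stated objective: simpler
-- what changed: Replaces A's while loop that mutates a digit list (pop/insert, char-by-char string rebuild, repeated int/str round-trips) and detects the return of the cycle to num, by a single all() over the len(str(num)) slice-rotations of the fixed string str(num).
-- outside the precondition, e.g. on check_circular(10, {1, 10}): A does not finish within the time limit, B returns True; on check_circular(103, {103}): A returns False, B returns False
import Mathlib
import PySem

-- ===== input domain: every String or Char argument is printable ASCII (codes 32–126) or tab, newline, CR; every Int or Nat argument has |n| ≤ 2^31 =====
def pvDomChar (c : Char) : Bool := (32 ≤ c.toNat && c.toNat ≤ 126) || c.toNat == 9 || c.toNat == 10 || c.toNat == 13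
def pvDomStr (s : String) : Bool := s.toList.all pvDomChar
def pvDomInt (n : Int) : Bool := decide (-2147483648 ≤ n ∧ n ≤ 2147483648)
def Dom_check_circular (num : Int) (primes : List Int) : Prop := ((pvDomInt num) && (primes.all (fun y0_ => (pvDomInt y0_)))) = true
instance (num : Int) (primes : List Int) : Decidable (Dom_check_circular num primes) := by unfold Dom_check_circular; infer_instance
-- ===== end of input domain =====

-- B replaces A's mutate-a-digit-list-and-detect-the-cycle while loop by a single all() over the
-- len(str(num)) slice-rotations of the fixed string str(num); same results on Pre_ (see Pre_ comment).

-- ===== PORT A =====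
-- the while loop, as fuel recursion; fuel len(str(num))+1 covers every terminating run admitted by
-- Pre_ (the rotation cycle returns to num after at most len(str(num)) steps there); the `none`
-- fallbacks are Python's IndexError/ValueError points, excluded by Pre_.
def check_circular_go (num : Int) (primes : List Int) : Nat → Int → Bool
  | 0, _ => false
  | fuel+1, next_num =>
    if decide (next_num ∈ primes) then
      match PySem.List.pop? (PySem.Int.toChars next_num) (-1) with
      | none => false
      | some (temp_char, rest) =>
        let num_str := PySem.List.insert rest 0 temp_char
        let new : List Char := num_str.foldl (fun acc l => acc ++ [l]) []
        match PySem.Int.ofChars? new with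
        | none => false
        | some nxt => if nxt = num then true else check_circular_go num primes fuel nxt
    else false

def check_circular (num : Int) (primes : List Int) : Bool :=
  check_circular_go num primes ((PySem.Int.toChars num).length + 1) num

-- ===== PORT B =====
def check_circular_alt (num : Int) (primes : List Int) : Bool :=
  let s := PySem.Int.toChars num
  (PySem.List.pyRange 0 (s.length : Int) 1).all fun i =>
    match PySem.Int.ofChars? (PySem.List.slice s (some i) none ++ PySem.List.slice s none (some i)) with
    | some v => decide (v ∈ primes)
    | none => false  -- int() ValueError: excluded by Pre_

-- ===== PRECONDITION & SPEC =====
-- the integer value of a pure digit string (helper for Pre_)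
def pvVal (t : List Char) : Int := t.foldl (fun a c => 10 * a + ((c.toNat : Int) - 48)) 0

-- Pre_ excludes (beyond inputs where A raises: negative num that lies in primes, where rotating the
-- '-' sign makes int() raise ValueError — B raises there too) the inputs where num lies in primes
-- and some decimal rotation of num has a leading zero (i.e. num has a 0 digit): there int()'s
-- truncation makes A's rotation chain an accident of its implementation — A can return False on a
-- fully circular set, or loop forever; formally Pre_ states that str(num) parses back to num and,
-- when num ∈ primes, that every rotation of str(num) round-trips int/str (always true for
-- nonnegative num without digit 0).
def Pre_check_circular (num : Int) (primes : List Int) : Prop :=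
  PySem.Int.ofChars? (PySem.Int.toChars num) = some num ∧
  (num ∉ primes ∨
    (0 ≤ num ∧ ∀ i < (PySem.Int.toChars num).length,
      PySem.Int.ofChars? ((PySem.Int.toChars num).rotate i)
        = some (pvVal ((PySem.Int.toChars num).rotate i)) ∧
      PySem.Int.toChars (pvVal ((PySem.Int.toChars num).rotate i))
        = (PySem.Int.toChars num).rotate i))
instance (num : Int) (primes : List Int) : Decidable (Pre_check_circular num primes) := by
  unfold Pre_check_circular; infer_instance

def pvWitness_check_circular : Int × List Int := (197, [197, 971, 719])

def Spec_check_circular (num : Int) (primes : List Int) (out : Bool) : Prop :=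
  out = check_circular_alt num primes
instance (num : Int) (primes : List Int) (out : Bool) : Decidable (Spec_check_circular num primes out) := by
  unfold Spec_check_circular; infer_instance

-- ===== CLAIM (what is proved, stated in full; the proofs are below) =====
def Claim_equal_check_circular : Prop := ∀ (num : Int) (primes : List Int),
  Dom_check_circular num primes → Pre_check_circular num primes →
    Spec_check_circular num primes (check_circular num primes)

-- ===== LEMMAS AND PROOFS =====

-- the rotation period of a list: the least positive m with s.rotate m = s
theorem pvPeriodEx (s : List Char) : ∃ m, 0 < m ∧ s.rotate m = s := by
  rcases eq_or_ne s [] with h | h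
  · exact ⟨1, Nat.one_pos, by simp [h, List.rotate_nil]⟩
  · exact ⟨s.length, List.length_pos_of_ne_nil h, List.rotate_length s⟩

def pvPeriod (s : List Char) : Nat := Nat.find (pvPeriodEx s)

theorem pvPeriod_pos (s : List Char) : 0 < pvPeriod s := (Nat.find_spec (pvPeriodEx s)).1

theorem pvRotate_period (s : List Char) : s.rotate (pvPeriod s) = s := (Nat.find_spec (pvPeriodEx s)).2

theorem pvPeriod_min (s : List Char) {m : Nat} (hm : 0 < m) (hr : s.rotate m = s) :
    pvPeriod s ≤ m := Nat.find_min' (pvPeriodEx s) ⟨hm, hr⟩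

theorem pvRotate_add_period (s : List Char) (a : Nat) :
    s.rotate (a + pvPeriod s) = s.rotate a := by
  rw [Nat.add_comm, ← List.rotate_rotate, pvRotate_period]

theorem pvRotate_mod_period (s : List Char) (a : Nat) :
    s.rotate a = s.rotate (a % pvPeriod s) := by
  have key : ∀ q r : Nat, s.rotate (pvPeriod s * q + r) = s.rotate r := by
    intro q
    induction q with
    | zero => simp
    | succ q ih =>
      intro r
      have : pvPeriod s * (q + 1) + r = (pvPeriod s * q + r) + pvPeriod s := by ring
      rw [this, pvRotate_add_period, ih]
  conv_lhs => rw [← Nat.div_add_mod a (pvPeriod s)]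
  exact key _ _

theorem pvRotate_eq_self_iff (s : List Char) (a : Nat) :
    s.rotate a = s ↔ pvPeriod s ∣ a := by
  constructor
  · intro h
    have hlt : a % pvPeriod s < pvPeriod s := Nat.mod_lt a (pvPeriod_pos s)
    have hr : s.rotate (a % pvPeriod s) = s := by rw [← pvRotate_mod_period, h]
    rcases Nat.eq_zero_or_pos (a % pvPeriod s) with h0 | hpos
    · exact Nat.dvd_of_mod_eq_zero h0
    · exact absurd (pvPeriod_min s hpos hr) (by omega)
  · rintro ⟨c, rfl⟩
    rw [pvRotate_mod_period, Nat.mul_mod_right, List.rotate_zero]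

theorem pvPeriod_dvd_length (s : List Char) : pvPeriod s ∣ s.length :=
  (pvRotate_eq_self_iff s s.length).mp (List.rotate_length s)

theorem pvPeriod_le_length (s : List Char) (h : s ≠ []) : pvPeriod s ≤ s.length :=
  Nat.le_of_dvd (List.length_pos_of_ne_nil h) (pvPeriod_dvd_length s)

-- p ∣ m*(n-1) ↔ p ∣ m when p ∣ n and 1 ≤ n
theorem pvDvd_mul_pred_iff {p n : Nat} (hp : p ∣ n) (hn : 1 ≤ n) (m : Nat) :
    p ∣ m * (n - 1) ↔ p ∣ m := by
  have hkey : m * (n - 1) + m = m * n := by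
    calc m * (n - 1) + m = m * ((n - 1) + 1) := by ring
    _ = m * n := by rw [Nat.sub_add_cancel hn]
  constructor
  · intro h
    have h2 : p ∣ m * n := Dvd.dvd.mul_left hp m
    have := Nat.dvd_sub h2 h
    have hsub : m * n - m * (n - 1) = m := by omega
    rwa [hsub] at this
  · intro h
    exact Dvd.dvd.mul_right h _

-- Python's "move last char to front" is rotate by (length - 1)
theorem pvPop_insert_rot (t : List Char) (h : t ≠ []) :
    PySem.List.pop? t (-1) = some (t.getLast h, t.dropLast) ∧
    t.getLast h :: t.dropLast = t.rotate (t.length - 1) := by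
  constructor
  · conv_lhs => rw [← List.dropLast_append_getLast h]
    exact PySem.List.pop?_last _ _
  · have hpos : 0 < t.length := List.length_pos_of_ne_nil h
    rw [List.rotate_eq_drop_append_take (by omega), List.drop_length_sub_one h,
      ← List.dropLast_eq_take, List.singleton_append]

-- the key A-side loop characterisation
theorem pvLoopA (s : List Char) (num : Int) (primes : List Int)
    (hne : s ≠ [])
    (hnum : pvVal s = num)
    (hrt : ∀ j : Nat, PySem.Int.ofChars? (s.rotate j) = some (pvVal (s.rotate j)) ∧
      PySem.Int.toChars (pvVal (s.rotate j)) = s.rotate j) :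
    ∀ (m k : Nat), k < pvPeriod s → pvPeriod s ≤ k + m →
      check_circular_go num primes m (pvVal (s.rotate (k * (s.length - 1)))) =
        decide (∀ j : Nat, k ≤ j → j < pvPeriod s →
          pvVal (s.rotate (j * (s.length - 1))) ∈ primes) := by
  intro m
  induction m with
  | zero => intro k hk hle; omega
  | succ m ih =>
    intro k hk hle
    have hn1 : 1 ≤ s.length := List.length_pos_of_ne_nil hne
    set p := pvPeriod s with hp
    set n := s.length with hnn
    by_cases hv : pvVal (s.rotate (k * (n - 1))) ∈ primes
    · -- in the loop body
      have htv : PySem.Int.toChars (pvVal (s.rotate (k * (n - 1)))) = s.rotate (k * (n - 1)) :=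
        (hrt _).2
      have hrne : s.rotate (k * (n - 1)) ≠ [] := by
        intro hcon
        have := List.length_rotate s (k * (n - 1))
        rw [hcon] at this
        simp at this
        omega
      obtain ⟨hpop, hrot⟩ := pvPop_insert_rot (s.rotate (k * (n - 1))) hrne
      have hrlen : (s.rotate (k * (n - 1))).length = n := List.length_rotate s _
      have hnew : (s.rotate (k * (n - 1))).getLast hrne :: (s.rotate (k * (n - 1))).dropLast
          = s.rotate ((k + 1) * (n - 1)) := by
        rw [hrot, hrlen, List.rotate_rotate]
        congr 1
        ring
      have hofc : PySem.Int.ofChars? (s.rotate ((k + 1) * (n - 1)))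
          = some (pvVal (s.rotate ((k + 1) * (n - 1)))) := (hrt _).1
      have hiff : pvVal (s.rotate ((k + 1) * (n - 1))) = num ↔ k + 1 = p := by
        constructor
        · intro h
          have h3 : PySem.Int.toChars num = s := by
            have h0 := (hrt 0).2
            rwa [List.rotate_zero, hnum] at h0
          have h2 := (hrt ((k + 1) * (n - 1))).2
          rw [h] at h2
          have hrs : s.rotate ((k + 1) * (n - 1)) = s := by rw [← h2, h3]
          have hd := (pvRotate_eq_self_iff s _).mp hrs
          have hd2 := (pvDvd_mul_pred_iff (pvPeriod_dvd_length s) hn1 (k + 1)).mp hd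
          have := Nat.le_of_dvd (by omega) hd2
          omega
        · intro h
          have hrs : s.rotate ((k + 1) * (n - 1)) = s := by
            apply (pvRotate_eq_self_iff s _).mpr
            apply (pvDvd_mul_pred_iff (pvPeriod_dvd_length s) hn1 (k + 1)).mpr
            rw [h]
          rw [hrs, hnum]
      simp only [check_circular_go, decide_eq_true_eq, hv, if_true, htv, hpop,
        PySem.List.insert_zero, PySem.List.foldl_append_singleton_eq_self, List.nil_append,
        hnew, hofc]
      by_cases heq : pvVal (s.rotate ((k + 1) * (n - 1))) = num
      · have hkp : k + 1 = p := hiff.mp heq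
        simp only [heq, if_true]
        symm
        rw [decide_eq_true_eq]
        intro j hkj hjp
        have : j = k := by omega
        rwa [this]
      · have hkp : k + 1 ≠ p := fun h => heq (hiff.mpr h)
        have hk1 : k + 1 < p := by omega
        simp only [heq, if_false]
        rw [ih (k + 1) hk1 (by omega)]
        rw [decide_eq_decide]
        constructor
        · intro hall j hkj hjp
          rcases Nat.eq_or_lt_of_le hkj with h | h
          · rwa [← h]
          · exact hall j (by omega) hjp
        · intro hall j hkj hjp
          exact hall j (by omega) hjp
    · -- guard fails: both sides false
      simp only [check_circular_go, hv, decide_false, Bool.false_eq_true, if_false]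
      symm
      rw [decide_eq_false_iff_not]
      intro hall
      exact hv (hall k le_rfl hk)

-- every rotation index i < n is hit by some j < p through j*(n-1)
theorem pvRot_surj (s : List Char) (hne : s ≠ []) :
    ∀ i < s.length, ∃ j < pvPeriod s,
      s.rotate (j * (s.length - 1)) = s.rotate i := by
  intro i hi
  set p := pvPeriod s with hp
  set n := s.length with hn
  have hppos : 0 < p := pvPeriod_pos s
  have hpd : p ∣ n := pvPeriod_dvd_length s
  have hn1 : 1 ≤ n := List.length_pos_of_ne_nil hne
  refine ⟨(p - i % p) % p, Nat.mod_lt _ hppos, ?_⟩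
  rw [pvRotate_mod_period s (_ * (n - 1)), pvRotate_mod_period s i]
  set j := (p - i % p) % p with hj
  have e1 : j * (n - 1) + (i + j) = i + j * n := by
    have : j * (n - 1) + j = j * n := by
      calc j * (n - 1) + j = j * ((n - 1) + 1) := by ring
      _ = j * n := by rw [Nat.sub_add_cancel hn1]
    omega
  have d1 : p ∣ i + j := by
    rcases Nat.eq_zero_or_pos (i % p) with h0 | hpos
    · have hj0 : j = 0 := by
        rw [hj, h0, Nat.sub_zero, Nat.mod_self]
      rw [hj0, Nat.add_zero]
      exact Nat.dvd_of_mod_eq_zero h0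
    · have hlt : i % p < p := Nat.mod_lt _ hppos
      have hjeq : j = p - i % p := by
        rw [hj]; exact Nat.mod_eq_of_lt (by omega)
      have hdm := Nat.div_add_mod i p
      refine ⟨i / p + 1, ?_⟩
      have : p * (i / p + 1) = p * (i / p) + p := by ring
      omega
  have d2 : p ∣ j * n := Dvd.dvd.mul_left hpd j
  obtain ⟨c1, hc1⟩ := d1
  obtain ⟨c2, hc2⟩ := d2
  congr 1
  have lhs_eq : j * (n - 1) % p = (j * (n - 1) + p * c1) % p :=
    (Nat.add_mul_mod_self_left (j * (n - 1)) p c1).symm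
  have rhs_eq : i % p = (i + p * c2) % p :=
    (Nat.add_mul_mod_self_left i p c2).symm
  rw [lhs_eq, rhs_eq]
  congr 1
  omega

-- B-side characterisation
theorem pvB_eq (num : Int) (primes : List Int)
    (hrt : ∀ j : Nat, PySem.Int.ofChars? ((PySem.Int.toChars num).rotate j)
      = some (pvVal ((PySem.Int.toChars num).rotate j))) :
    check_circular_alt num primes =
      decide (∀ i : Nat, i < (PySem.Int.toChars num).length →
        pvVal ((PySem.Int.toChars num).rotate i) ∈ primes) := by
  set s := PySem.Int.toChars num with hs
  unfold check_circular_alt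
  simp only [PySem.List.pyRange_zero_natCast, List.all_map]
  rw [Bool.eq_iff_iff, List.all_eq_true, decide_eq_true_eq]
  constructor
  · intro hall i hi
    have := hall i (List.mem_range.mpr hi)
    simp only [Function.comp] at this
    rw [PySem.List.slice_from_natCast, PySem.List.slice_to_natCast,
      ← List.rotate_eq_drop_append_take (Nat.le_of_lt hi), hrt i] at this
    simpa using this
  · intro hall i hi
    have hi' := List.mem_range.mp hi
    simp only [Function.comp]
    rw [PySem.List.slice_from_natCast, PySem.List.slice_to_natCast,
      ← List.rotate_eq_drop_append_take (Nat.le_of_lt hi'), hrt i]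
    simpa using hall i hi'

theorem pvToChars_ne_nil (num : Int) (h : PySem.Int.ofChars? (PySem.Int.toChars num) = some num) :
    PySem.Int.toChars num ≠ [] := by
  intro hcon
  rw [hcon] at h
  simp [show PySem.Int.ofChars? ([] : List Char) = none from rfl] at h

-- ===== VERDICT (by name: the statement is the Claim_ definition above) =====
theorem check_circular_spec : Claim_equal_check_circular := by
  intro num primes _hdom hpre
  unfold Spec_check_circular
  obtain ⟨h1, hcase⟩ := hpre
  have hne : PySem.Int.toChars num ≠ [] := pvToChars_ne_nil num h1
  set s := PySem.Int.toChars num with hs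
  have hn1 : 1 ≤ s.length := List.length_pos_of_ne_nil hne
  rcases hcase with hnp | ⟨h0, hrt0⟩
  · -- num ∉ primes: both sides are false
    have hA : check_circular num primes = false := by
      unfold check_circular check_circular_go
      rw [← hs]
      simp [hnp]
    have hB : check_circular_alt num primes = false := by
      unfold check_circular_alt
      rw [← hs, List.all_eq_false]
      refine ⟨0, ?_, ?_⟩
      · rw [PySem.List.mem_pyRange_one]
        constructor
        · omega
        · exact_mod_cast hn1
      · have h00 : (0 : Int) = ((0 : Nat) : Int) := rfl
        rw [h00, PySem.List.slice_from_natCast, PySem.List.slice_to_natCast]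
        simp only [List.drop_zero, List.take_zero, List.append_nil]
        rw [h1]
        simp [hnp]
    rw [hA, hB]
  · -- num ∈ primes branch hypotheses: extend round-trips to all j
    have hrt : ∀ j : Nat, PySem.Int.ofChars? (s.rotate j) = some (pvVal (s.rotate j)) ∧
        PySem.Int.toChars (pvVal (s.rotate j)) = s.rotate j := by
      intro j
      have hmod : s.rotate j = s.rotate (j % s.length) := by
        rw [List.rotate_mod]
      rw [hmod]
      exact hrt0 (j % s.length) (Nat.mod_lt _ (by omega))
    have hnum : pvVal s = num := by
      have := (hrt 0).1
      rw [List.rotate_zero] at this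
      rw [h1] at this
      exact (Option.some_injective _ this.symm)
    -- A side
    have hA : check_circular num primes =
        decide (∀ j : Nat, j < pvPeriod s →
          pvVal (s.rotate (j * (s.length - 1))) ∈ primes) := by
      have hstart : num = pvVal (s.rotate (0 * (s.length - 1))) := by
        rw [Nat.zero_mul, List.rotate_zero, hnum]
      have hloop := pvLoopA s num primes hne hnum hrt (s.length + 1) 0 (pvPeriod_pos s)
        (by have := pvPeriod_le_length s hne; omega)
      rw [← hstart] at hloop
      unfold check_circular
      rw [hloop]
      rw [decide_eq_decide]
      constructor
      · intro h j hj; exact h j (Nat.zero_le j) hj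
      · intro h j _ hj; exact h j hj
    have hB : check_circular_alt num primes =
        decide (∀ i : Nat, i < s.length → pvVal (s.rotate i) ∈ primes) := by
      rw [hs] at hne ⊢
      exact pvB_eq num primes (fun j => (hrt j).1)
    rw [hA, hB, decide_eq_decide]
    constructor
    · intro hall i hi
      obtain ⟨j, hj, hrotj⟩ := pvRot_surj s hne i hi
      rw [← hrotj]
      exact hall j hj
    · intro hall j _
      have hi : j * (s.length - 1) % s.length < s.length := Nat.mod_lt _ (by omega)
      rw [← List.rotate_mod]
      exact hall _ hi
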